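-- pv_equiv track=rewrite | github.com/Raagavan1092/Paninian-Grammar-Engine | Sandhi.py | getValidRoopa
-- ===== SOURCE A (Python) =====
-- def getValidRoopa(allnums, allexps, thisnum):
--     allnums = list(allnums)
--     if allnums:
--         exp_sets = dict(zip(allnums, allexps[1:]))
--         removevals = []
--         for i in range(len(allnums)):
--             if allnums[i] > thisnum and allnums[i] > '8.2.0':
--                 removevals.append(allnums[i])
--         if removevals:
--             for val in removevals:
--                 allnums.remove(val)
--
--             if allnums:
--                 return exp_sets[allnums[-1]]
--             else:
--                 return allexps[0]
--     return allexps[-1]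
-- ===== SOURCE B (Python) =====
-- def getValidRoopa(allnums, allexps, thisnum):
--     allnums = list(allnums)
--     if not allnums:
--         return allexps[-1]
--     any_offending = False
--     last_keep = None
--     for i, v in enumerate(allnums):
--         if v > thisnum and v > '8.2.0':
--             any_offending = True
--         else:
--             last_keep = i
--     if not any_offending:
--         return allexps[-1]
--     if last_keep is None:
--         return allexps[0]
--     return allexps[last_keep + 1]
-- ===== Notes on version B (the rewrite author's own statement) =====
-- stated objective: simpler
-- what changed: Replaces the zip-dict, the removevals collection pass and the quadratic list.remove loop by a single enumerate pass that tracks whether any offending number was seen and the index of the last non-offending one, then indexes allexps directly.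
-- outside the precondition, e.g. on getValidRoopa(['1', '9', '1'], ['a', 'b'], '0'): A returns 'b', B raises IndexError
import Mathlib
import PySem

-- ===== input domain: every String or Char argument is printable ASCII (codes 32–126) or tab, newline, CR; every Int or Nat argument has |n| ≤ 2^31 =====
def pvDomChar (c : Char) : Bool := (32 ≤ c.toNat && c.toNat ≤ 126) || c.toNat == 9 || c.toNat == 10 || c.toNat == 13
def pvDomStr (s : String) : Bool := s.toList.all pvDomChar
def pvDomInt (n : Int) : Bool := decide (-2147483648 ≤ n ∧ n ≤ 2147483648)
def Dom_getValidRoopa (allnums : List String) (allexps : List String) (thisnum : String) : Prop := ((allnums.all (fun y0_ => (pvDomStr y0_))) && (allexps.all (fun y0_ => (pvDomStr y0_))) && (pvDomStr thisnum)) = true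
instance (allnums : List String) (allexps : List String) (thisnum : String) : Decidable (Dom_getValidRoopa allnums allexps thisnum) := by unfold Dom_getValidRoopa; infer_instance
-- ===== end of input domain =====

-- B replaces A's zip-dict + removevals pass + quadratic remove loop by one enumerate pass
-- tracking whether any offending number was seen and the last non-offending index (simpler).

-- ===== PORT A =====
def getValidRoopa (allnums : List String) (allexps : List String) (thisnum : String) : String :=
  -- allnums = list(allnums) : a fresh copy, no observable effect on the return value
  if allnums ≠ [] then
    let exp_sets : PySem.Dict String String :=
      PySem.Dict.ofList (allnums.zip (PySem.List.slice allexps (some 1) none))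
    let removevals : List String :=
      (PySem.List.pyRange 0 (allnums.length : Int) 1).foldl
        (fun acc i =>
          if thisnum.toList < (PySem.List.pyGetD allnums i "").toList ∧ "8.2.0".toList < (PySem.List.pyGetD allnums i "").toList
          then acc ++ [PySem.List.pyGetD allnums i ""] else acc) []
    if removevals ≠ [] then
      -- remove? never returns none here: every collected value is still present (ValueError unreachable)
      let allnums2 := removevals.foldl (fun acc v => (PySem.List.remove? acc v).getD acc) allnums
      if allnums2 ≠ [] then
        (exp_sets.get? (PySem.List.pyGetD allnums2 (-1) "")).getD ""   -- none = KeyError, excluded by Pre_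
      else
        (PySem.List.pyGet? allexps 0).getD ""                          -- none = IndexError, excluded by Pre_
    else
      (PySem.List.pyGet? allexps (-1)).getD ""                         -- none = IndexError, excluded by Pre_
  else
    (PySem.List.pyGet? allexps (-1)).getD ""                           -- none = IndexError, excluded by Pre_

-- ===== PORT B =====
def getValidRoopa_alt (allnums : List String) (allexps : List String) (thisnum : String) : String :=
  if allnums = [] then (PySem.List.pyGet? allexps (-1)).getD ""        -- none = IndexError, excluded by Pre_
  else
    let st : Bool × Option Int :=
      (PySem.List.enumerate allnums 0).foldl
        (fun st p =>
          if thisnum.toList < p.2.toList ∧ "8.2.0".toList < p.2.toList then (true, st.2) else (st.1, some p.1))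
        (false, none)
    if st.1 = false then (PySem.List.pyGet? allexps (-1)).getD ""      -- none = IndexError, excluded by Pre_
    else
      match st.2 with
      | none => (PySem.List.pyGet? allexps 0).getD ""                  -- none = IndexError, excluded by Pre_
      | some i => (PySem.List.pyGet? allexps (i + 1)).getD ""          -- none = IndexError, excluded by Pre_

-- ===== PRECONDITION & SPEC =====
-- Pre_ excludes exactly the inputs where a program raises: empty allexps (IndexError), and — when some
-- element is offending — a non-offending index i with allexps lacking position i+1 (A raises KeyError or,
-- when an earlier duplicate of that value sits inside the zip range, returns that stale entry while B's
-- direct allexps[i+1] raises IndexError, so no single value is matchable there).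
def Pre_getValidRoopa (allnums : List String) (allexps : List String) (thisnum : String) : Prop :=
  allexps ≠ [] ∧
  ((∃ v ∈ allnums, thisnum.toList < v.toList ∧ "8.2.0".toList < v.toList) →
    ∀ (i : Nat) (h : i < allnums.length),
      ¬ (thisnum.toList < allnums[i].toList ∧ "8.2.0".toList < allnums[i].toList) → i + 2 ≤ allexps.length)
instance (allnums : List String) (allexps : List String) (thisnum : String) : Decidable (Pre_getValidRoopa allnums allexps thisnum) := by unfold Pre_getValidRoopa; infer_instance

def pvWitness_getValidRoopa : List String × List String × String :=
  (["8.3.0", "1.1.1"], ["a", "b", "c"], "8.2.5")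

def Spec_getValidRoopa (allnums : List String) (allexps : List String) (thisnum : String) (out : String) : Prop := out = getValidRoopa_alt allnums allexps thisnum
instance (allnums : List String) (allexps : List String) (thisnum : String) (out : String) : Decidable (Spec_getValidRoopa allnums allexps thisnum out) := by unfold Spec_getValidRoopa; infer_instance

-- ===== CLAIM (what is proved, stated in full; the proofs are below) =====
def Claim_equal_getValidRoopa : Prop := ∀ (allnums : List String) (allexps : List String) (thisnum : String), Dom_getValidRoopa allnums allexps thisnum → Pre_getValidRoopa allnums allexps thisnum → Spec_getValidRoopa allnums allexps thisnum (getValidRoopa allnums allexps thisnum)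

-- ===== LEMMAS AND PROOFS =====

-- the offending test, as the Bool predicate both loops branch on
-- (Python's s < t on str is code-point lexicographic = '<' on toList, per PYSEM)
def pvOff (thisnum v : String) : Bool := decide (thisnum.toList < v.toList ∧ "8.2.0".toList < v.toList)

-- index of the last element failing q (the last "kept" element), as a structural recursion
def pvLastKeep {α : Type} (q : α → Bool) : List α → Option Nat
  | [] => none
  | v :: t =>
    match pvLastKeep q t with
    | some j => some (j + 1)
    | none => if q v then none else some 0

-- ---- A-side: the remove loop is filtering ----

theorem pv_foldl_remove_skip {α : Type} [BEq α] [LawfulBEq α] (a : α) (l : List α)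
    (hne : ∀ v ∈ l, v ≠ a) (acc : List α) :
    l.foldl (fun acc v => (PySem.List.remove? acc v).getD acc) (a :: acc)
      = a :: l.foldl (fun acc v => (PySem.List.remove? acc v).getD acc) acc := by
  induction l generalizing acc with
  | nil => simp
  | cons x t ih =>
    have hx : a ≠ x := fun he => (hne x (by simp)) he.symm
    simp only [List.foldl_cons]
    rw [PySem.List.remove?_cons_of_ne _ hx]
    have ih' := ih (fun v hv => hne v (by simp [hv]))
    cases hr : PySem.List.remove? acc x with
    | none => simpa [hr] using ih' acc
    | some r => simpa [hr] using ih' r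

theorem pv_foldl_remove_filter {α : Type} [BEq α] [LawfulBEq α] (q : α → Bool) (xs : List α) :
    (xs.filter q).foldl (fun acc v => (PySem.List.remove? acc v).getD acc) xs
      = xs.filter (fun v => !q v) := by
  induction xs with
  | nil => rfl
  | cons a t ih =>
    by_cases hq : q a = true
    · simp only [List.filter_cons, hq, if_pos, List.foldl_cons,
        PySem.List.remove?_cons_self, Option.getD_some]
      simpa [hq] using ih
    · have hq' : q a = false := by simpa using hq
      simp only [List.filter_cons, hq', Bool.false_eq_true, if_false, Bool.not_false, if_pos]
      rw [pv_foldl_remove_skip a _ (fun v hv => by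
        have := List.of_mem_filter hv
        intro he; rw [he] at this; simp [hq'] at this)]
      simp [ih]

-- ---- B-side: the enumerate fold computes (any offending, last kept index) ----

theorem pv_foldB (thisnum : String) (xs : List String) :
    ∀ (s : Int) (b : Bool) (o : Option Int),
    (PySem.List.enumerate xs s).foldl
        (fun st p => if thisnum.toList < p.2.toList ∧ "8.2.0".toList < p.2.toList then (true, st.2) else (st.1, some p.1))
        (b, o)
      = (b || xs.any (pvOff thisnum),
         match pvLastKeep (pvOff thisnum) xs with
         | some j => some (s + (j : Nat))
         | none => o) := by
  induction xs with
  | nil => intro s b o; simp [pvLastKeep]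
  | cons v t ih =>
    intro s b o
    by_cases hv : thisnum.toList < v.toList ∧ "8.2.0".toList < v.toList
    · have hq : pvOff thisnum v = true := by unfold pvOff; exact decide_eq_true hv
      simp only [PySem.List.enumerate_cons, List.foldl_cons, if_pos hv, ih (s+1), pvLastKeep,
        List.any_cons, hq, Bool.true_or, Bool.or_true]
      cases hl : pvLastKeep (pvOff thisnum) t with
      | none => simp
      | some j => simp; omega
    · have hq : pvOff thisnum v = false := by
        simp only [pvOff, decide_eq_false_iff_not]; exact hv
      simp only [PySem.List.enumerate_cons, List.foldl_cons, if_neg hv, ih (s+1), pvLastKeep,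
        List.any_cons, hq, Bool.false_or]
      cases hl : pvLastKeep (pvOff thisnum) t with
      | none => simp
      | some j => simp; omega

-- ---- pvLastKeep characterisation: some j names the last index whose element fails q ----

theorem pvLastKeep_none_iff {α : Type} (q : α → Bool) (xs : List α) :
    pvLastKeep q xs = none ↔ ∀ v ∈ xs, q v = true := by
  induction xs with
  | nil => simp [pvLastKeep]
  | cons v t ih =>
    cases hl : pvLastKeep q t with
    | none =>
      have ht := ih.mp hl
      simp only [pvLastKeep, hl]
      by_cases hq : q v = true <;> simp [hq]; exact ht
    | some j =>
      simp only [pvLastKeep, hl]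
      constructor
      · intro h; exact absurd h (by simp)
      · intro h
        have : pvLastKeep q t = none := ih.mpr (fun w hw => h w (by simp [hw]))
        rw [this] at hl; exact absurd hl (by simp)

theorem pvLastKeep_some {α : Type} (q : α → Bool) (xs : List α) (j : Nat)
    (h : pvLastKeep q xs = some j) :
    ∃ (hj : j < xs.length), q xs[j] = false ∧
      ∀ k (hk : k < xs.length), j < k → q xs[k] = true := by
  induction xs generalizing j with
  | nil => simp [pvLastKeep] at h
  | cons v t ih =>
    cases hl : pvLastKeep q t with
    | some j' =>
      rw [pvLastKeep, hl] at h
      obtain rfl : j = j' + 1 := by simpa using h.symm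
      obtain ⟨hj', hqf, hall⟩ := ih j' hl
      refine ⟨by simpa using Nat.succ_lt_succ hj', by simpa using hqf, ?_⟩
      intro k hk hlt
      cases k with
      | zero => omega
      | succ k' => simpa using hall k' (by simpa using hk) (by omega)
    | none =>
      rw [pvLastKeep, hl] at h
      by_cases hq : q v = true
      · simp [hq] at h
      · have hq' : q v = false := by simpa using hq
        obtain rfl : j = 0 := by
          rw [if_neg (by simp [hq'])] at h; simpa using h.symm
        have ht := (pvLastKeep_none_iff q t).mp hl
        refine ⟨by simp, by simpa using hq', ?_⟩
        intro k hk hlt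
        cases k with
        | zero => omega
        | succ k' => simpa using ht _ (List.getElem_mem (by simpa using hk))

theorem pvLastKeep_getLast {α : Type} (q : α → Bool) (xs : List α) (j : Nat)
    (hj : j < xs.length) (h : pvLastKeep q xs = some j) :
    (xs.filter (fun v => !q v)).getLast? = some xs[j] := by
  induction xs generalizing j with
  | nil => simp [pvLastKeep] at h
  | cons v t ih =>
    cases hl : pvLastKeep q t with
    | some j' =>
      rw [pvLastKeep, hl] at h
      obtain rfl : j = j' + 1 := by simpa using h.symm
      obtain ⟨hj', hqf, _⟩ := pvLastKeep_some q t j' hl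
      have hne : t.filter (fun v => !q v) ≠ [] := by
        intro hnil
        have : t[j'] ∈ t.filter (fun v => !q v) :=
          List.mem_filter.mpr ⟨List.getElem_mem hj', by simp [hqf]⟩
        simp [hnil] at this
      have ihl := ih j' (by omega) hl
      by_cases hq : q v = true
      · simpa [List.filter_cons, hq] using ihl
      · have hq' : q v = false := by simpa using hq
        simp only [List.filter_cons, hq', Bool.not_false, if_pos, List.getLast?_cons, ihl]
        simp
    | none =>
      rw [pvLastKeep, hl] at h
      by_cases hq : q v = true
      · simp [hq] at h
      · have hq' : q v = false := by simpa using hq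
        obtain rfl : j = 0 := by
          rw [if_neg (by simp [hq'])] at h; simpa using h.symm
        have ht := (pvLastKeep_none_iff q t).mp hl
        have : t.filter (fun v => !q v) = [] :=
          List.filter_eq_nil_iff.mpr (fun a ha => by simp [ht a ha])
        simp [hq', this]

-- ---- Dict built by dict(zip(...)): lookup of a key whose last occurrence is known ----

theorem pv_get?_update_of_ne {κ ν : Type} [BEq κ] [LawfulBEq κ] (l : List (κ × ν))
    (d : PySem.Dict κ ν) (k : κ) (h : ∀ p ∈ l, p.1 ≠ k) :
    (d.update l).get? k = d.get? k := by
  induction l generalizing d with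
  | nil => rfl
  | cons p t ih =>
    have : (PySem.Dict.update d (p :: t)) = PySem.Dict.update (d.insert p.1 p.2) t := rfl
    rw [this, ih _ (fun q hq => h q (by simp [hq])),
      PySem.Dict.get?_insert_of_ne _ _ (Ne.symm (h p (by simp)))]

theorem pv_get?_ofList_last {κ ν : Type} [BEq κ] [LawfulBEq κ]
    (pre suf : List (κ × ν)) (k : κ) (v : ν) (h : ∀ p ∈ suf, p.1 ≠ k) :
    (PySem.Dict.ofList (pre ++ (k, v) :: suf)).get? k = some v := by
  have : PySem.Dict.ofList (pre ++ (k, v) :: suf)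
      = PySem.Dict.update ((PySem.Dict.empty.update pre).insert k v) suf := by
    simp [PySem.Dict.ofList, PySem.Dict.update, List.foldl_append]
  rw [this, pv_get?_update_of_ne suf _ k h, PySem.Dict.get?_insert_self]

-- ===== VERDICT (by name: the statement is the Claim_ definition above) =====
-- the A-side removevals loop is a filter by the offending test
theorem pv_removevals_eq (allnums : List String) (thisnum : String) :
    (PySem.List.pyRange 0 (allnums.length : Int) 1).foldl
        (fun acc i =>
          if thisnum.toList < (PySem.List.pyGetD allnums i "").toList ∧ "8.2.0".toList < (PySem.List.pyGetD allnums i "").toList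
          then acc ++ [PySem.List.pyGetD allnums i ""] else acc) []
      = allnums.filter (pvOff thisnum) := by
  rw [PySem.List.foldl_pyRange_zero_pyGetD' allnums ""
    (fun acc v => if thisnum.toList < v.toList ∧ "8.2.0".toList < v.toList then acc ++ [v] else acc) []]
  rw [PySem.List.foldl_append_ite_eq_filter]
  rfl

theorem getValidRoopa_spec : Claim_equal_getValidRoopa := by
  intro allnums allexps thisnum _hdom hpre
  obtain ⟨hexp, hbound⟩ := hpre
  unfold Spec_getValidRoopa
  by_cases hn : allnums = []
  · simp [getValidRoopa, getValidRoopa_alt, hn]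
  · simp only [getValidRoopa, getValidRoopa_alt, if_pos hn, if_neg hn,
      pv_removevals_eq, pv_foldB thisnum allnums 0 false none]
    by_cases hfe : allnums.filter (pvOff thisnum) = []
    · have hany : allnums.any (pvOff thisnum) = false := by
        rw [List.any_eq_false]; intro v hv hq
        exact (List.filter_eq_nil_iff.mp hfe) v hv (by simp [hq])
      simp [hfe, hany]
    · have hany : allnums.any (pvOff thisnum) = true := by
        obtain ⟨v, hv⟩ := List.exists_mem_of_ne_nil _ hfe
        exact List.any_eq_true.mpr ⟨v, List.mem_of_mem_filter hv, List.of_mem_filter hv⟩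
      rw [pv_foldl_remove_filter (pvOff thisnum) allnums]
      simp only [hfe, hany, ne_eq, not_false_eq_true, if_pos]
      rw [if_neg (show ¬((false || true) = false) by simp)]
      cases hK : pvLastKeep (pvOff thisnum) allnums with
      | none =>
        have hfil : allnums.filter (fun v => !pvOff thisnum v) = [] :=
          List.filter_eq_nil_iff.mpr (fun a ha => by
            simp [(pvLastKeep_none_iff _ _).mp hK a ha])
        simp [hfil]
      | some j =>
        obtain ⟨hj, hqf, hall⟩ := pvLastKeep_some (pvOff thisnum) allnums j hK
        have hmem : allnums[j] ∈ allnums.filter (fun v => !pvOff thisnum v) :=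
          List.mem_filter.mpr ⟨List.getElem_mem hj, by simp [hqf]⟩
        have hfil : allnums.filter (fun v => !pvOff thisnum v) ≠ [] := by
          intro h0; rw [h0] at hmem; simp at hmem
        rw [if_pos (show ¬(List.filter (fun v => !pvOff thisnum v) allnums = []) from hfil)]
        -- the bound from Pre_ : j + 2 ≤ allexps.length
        have hoff : ∃ v ∈ allnums, thisnum.toList < v.toList ∧ "8.2.0".toList < v.toList := by
          obtain ⟨v, hv⟩ := List.exists_mem_of_ne_nil _ hfe
          exact ⟨v, List.mem_of_mem_filter hv, by
            have := List.of_mem_filter hv; simpa [pvOff] using this⟩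
        have hj2 : j + 2 ≤ allexps.length :=
          hbound hoff j hj (by simpa [pvOff] using hqf)
        -- the last survivor is allnums[j]
        have hgd : PySem.List.pyGetD (allnums.filter (fun v => !pvOff thisnum v)) (-1) ""
            = allnums[j] := by
          rw [PySem.List.pyGetD_neg_one _ _ hfil]
          have h1 := List.getLast?_eq_some_getLast (l := allnums.filter (fun v => !pvOff thisnum v)) hfil
          have h2 := pvLastKeep_getLast (pvOff thisnum) allnums j hj hK
          rw [h1] at h2; exact Option.some_injective _ h2
        rw [hgd, PySem.List.slice_from_one]
        -- dict(zip(allnums, allexps[1:])) at the key allnums[j]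
        have hjz : j < (allnums.zip allexps.tail).length := by
          rw [List.length_zip]; simp [List.length_tail]; omega
        have hdecomp : allnums.zip allexps.tail
            = (allnums.zip allexps.tail).take j
              ++ (allnums[j], allexps[j + 1]) :: (allnums.zip allexps.tail).drop (j + 1) := by
          conv_lhs => rw [← List.take_append_drop j (allnums.zip allexps.tail),
            List.drop_eq_getElem_cons hjz]
          congr 2
          rw [List.getElem_zip]
          congr 1
          exact List.getElem_tail (by rw [List.length_zip] at hjz; omega)
        have hsuf : ∀ p ∈ (allnums.zip allexps.tail).drop (j + 1), p.1 ≠ allnums[j] := by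
          intro p hp
          obtain ⟨k, hk, hpk⟩ := List.mem_iff_getElem.mp hp
          have hk' : j + 1 + k < allnums.length := by
            have := hk; rw [List.length_drop, List.length_zip] at this; omega
          have : p.1 = allnums[j + 1 + k] := by
            rw [← hpk, List.getElem_drop, List.getElem_zip]
          rw [this]
          intro he
          have h1 : pvOff thisnum allnums[j + 1 + k] = true := hall _ hk' (by omega)
          rw [he, hqf] at h1; exact absurd h1 (by simp)
        rw [hdecomp, pv_get?_ofList_last _ _ _ _ hsuf]
        -- B's index
        have hidx : (0 : Int) + (j : Int) + 1 = ((j + 1 : Nat) : Int) := by push_cast; ring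
        show (some allexps[j + 1]).getD ""
          = (PySem.List.pyGet? allexps ((0 : Int) + (j : Int) + 1)).getD ""
        rw [hidx, PySem.List.pyGet?_natCast,
          List.getElem?_eq_getElem (by omega : j + 1 < allexps.length)]
        rfl
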